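-- pv_equiv track=rewrite | github.com/shimo-nu/2d_lidar_sim | utils.py | makeWall
-- ===== SOURCE A (Python) =====
-- def makeWall(robot_position, lidar_radius):
--         _wall = []
--         left_upper = [robot_position[0] - lidar_radius,
--                       robot_position[1] + lidar_radius]
--         left_lower = [robot_position[0] - lidar_radius,
--                       robot_position[1] - lidar_radius]
--         right_upper = [robot_position[0] + lidar_radius,
--                        robot_position[1] + lidar_radius]
--         right_lower = [robot_position[0] + lidar_radius,
--                        robot_position[1] - lidar_radius]
--         _wall.extend([[left_lower[0], left_lower[1] + i]
--                      for i in range(2*lidar_radius)])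
--         _wall.extend([[left_upper[0] + i, left_upper[1]]
--                      for i in range(2*lidar_radius)])
--         _wall.extend([[right_upper[0], right_upper[1] - i]
--                      for i in range(2*lidar_radius)])
--         _wall.extend([[right_lower[0] - i, right_lower[1]]
--                      for i in range(2*lidar_radius)])
--         return _wall
-- ===== SOURCE B (Python) =====
-- def makeWall(robot_position, lidar_radius):
--     # Branch-free closed form: point k of the perimeter, k in [0, 8r),
--     # is obtained directly from k by min/max clamping (no corners, no sides).
--     x, y = robot_position[0], robot_position[1]
--     m = 2 * lidar_radius
--     return [[x - lidar_radius + max(0, min(k - m, m, 4 * m - k)),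
--              y - lidar_radius + max(0, min(k, m, 3 * m - k))]
--             for k in range(4 * m)]
-- ===== Notes on version B (the rewrite author's own statement) =====
-- stated objective: alternative
-- what changed: B replaces A's four corner-anchored side comprehensions with a single branch-free closed-form parametrization of the perimeter: point k is computed independently from its index by min/max clamping formulas.
import Mathlib
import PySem

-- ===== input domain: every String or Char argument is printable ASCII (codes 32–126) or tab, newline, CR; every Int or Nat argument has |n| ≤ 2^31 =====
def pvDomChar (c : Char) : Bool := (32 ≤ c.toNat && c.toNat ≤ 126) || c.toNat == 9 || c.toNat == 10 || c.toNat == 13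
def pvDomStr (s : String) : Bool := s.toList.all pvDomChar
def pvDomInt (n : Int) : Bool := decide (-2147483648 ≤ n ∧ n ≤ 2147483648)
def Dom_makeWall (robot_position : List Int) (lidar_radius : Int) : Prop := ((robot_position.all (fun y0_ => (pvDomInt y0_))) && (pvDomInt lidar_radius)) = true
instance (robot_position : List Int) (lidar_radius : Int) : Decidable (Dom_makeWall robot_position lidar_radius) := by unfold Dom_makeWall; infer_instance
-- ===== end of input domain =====

-- B replaces A's four corner-anchored side lists with one branch-free closed-form
-- parametrization: point k of the perimeter is computed directly from its index k.
-- A raises IndexError when robot_position has fewer than 2 entries; Pre_ excludes that.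

-- ===== PORT A =====
def makeWall (robot_position : List Int) (lidar_radius : Int) : List (List Int) :=
  match PySem.List.pyGet? robot_position 0, PySem.List.pyGet? robot_position 1 with
  | some x, some y =>
    let left_upper := [x - lidar_radius, y + lidar_radius]
    let left_lower := [x - lidar_radius, y - lidar_radius]
    let right_upper := [x + lidar_radius, y + lidar_radius]
    let right_lower := [x + lidar_radius, y - lidar_radius]
    ((PySem.List.pyRange 0 (2*lidar_radius) 1).map
        (fun i => [PySem.List.pyGetD left_lower 0 0, PySem.List.pyGetD left_lower 1 0 + i]))
    ++ ((PySem.List.pyRange 0 (2*lidar_radius) 1).map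
        (fun i => [PySem.List.pyGetD left_upper 0 0 + i, PySem.List.pyGetD left_upper 1 0]))
    ++ ((PySem.List.pyRange 0 (2*lidar_radius) 1).map
        (fun i => [PySem.List.pyGetD right_upper 0 0, PySem.List.pyGetD right_upper 1 0 - i]))
    ++ ((PySem.List.pyRange 0 (2*lidar_radius) 1).map
        (fun i => [PySem.List.pyGetD right_lower 0 0 - i, PySem.List.pyGetD right_lower 1 0]))
  | _, _ => []  -- IndexError in Python; excluded by Pre_makeWall

-- ===== PORT B =====
def makeWall_alt (robot_position : List Int) (lidar_radius : Int) : List (List Int) :=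
  match PySem.List.pyGet? robot_position 0 with
  | none => []  -- IndexError in Python; excluded by Pre_makeWall
  | some x =>
    match PySem.List.pyGet? robot_position 1 with
    | none => []  -- IndexError in Python; excluded by Pre_makeWall
    | some y =>
      let m := 2 * lidar_radius
      (PySem.List.pyRange 0 (4*m) 1).map
        (fun k => [x - lidar_radius + max 0 (min (k - m) (min m (4*m - k))),
                   y - lidar_radius + max 0 (min k (min m (3*m - k)))])

-- ===== PRECONDITION & SPEC =====
-- A raises IndexError unless robot_position has the two coordinates it indexes.
def Pre_makeWall (robot_position : List Int) (lidar_radius : Int) : Prop := 2 ≤ robot_position.length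
instance (robot_position : List Int) (lidar_radius : Int) : Decidable (Pre_makeWall robot_position lidar_radius) := by unfold Pre_makeWall; infer_instance
def pvWitness_makeWall : List Int × Int := ([0, 0], 1)

def Spec_makeWall (robot_position : List Int) (lidar_radius : Int) (out : List (List Int)) : Prop := out = makeWall_alt robot_position lidar_radius
instance (robot_position : List Int) (lidar_radius : Int) (out : List (List Int)) : Decidable (Spec_makeWall robot_position lidar_radius out) := by unfold Spec_makeWall; infer_instance

-- ===== CLAIM (what is proved, stated in full; the proofs are below) =====
def Claim_equal_makeWall : Prop := ∀ (robot_position : List Int) (lidar_radius : Int), Dom_makeWall robot_position lidar_radius → Pre_makeWall robot_position lidar_radius → Spec_makeWall robot_position lidar_radius (makeWall robot_position lidar_radius)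

-- ===== LEMMAS AND PROOFS =====

-- bridge: a pyRange over [0,n) with step 1 is a map over List.range n.toNat
lemma pyRange_map (n : Int) (f : Int → List Int) :
    (PySem.List.pyRange 0 n 1).map f
      = (List.range n.toNat).map (fun k : Nat => f (k : Int)) := by
  rw [PySem.List.pyRange_one, List.map_map]
  simp only [Int.sub_zero]
  apply List.map_congr_left
  intro k _
  simp

theorem makeWall_spec : Claim_equal_makeWall := by
  intro rp r _ hpre
  unfold Spec_makeWall makeWall makeWall_alt
  rcases rp with _ | ⟨x, rp'⟩
  · simp [Pre_makeWall] at hpre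
  rcases rp' with _ | ⟨y, rest⟩
  · simp [Pre_makeWall] at hpre
  have h0 : PySem.List.pyGet? (x :: y :: rest) 0 = some x := PySem.List.pyGet?_zero_cons _ _
  have h1 : PySem.List.pyGet? (x :: y :: rest) 1 = some y := by
    simp [PySem.List.pyGet?, PySem.List.pyIdx?]
  rw [h0, h1]
  simp only [pyRange_map]
  simp only [PySem.List.pyGetD, PySem.List.pyGet?, PySem.List.pyIdx?]
  norm_num
  by_cases h : r ≤ 0
  · have h2 : (2 * r).toNat = 0 := by omega
    have h8 : (4 * (2 * r)).toNat = 0 := by omega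
    simp [h2, h8]
  · set m : Nat := (2 * r).toNat with hm
    have hmi : ((m : Int)) = 2 * r := by omega
    have h8 : (4 * (2 * r)).toNat = m + m + m + m := by omega
    rw [h8, List.range_add, List.range_add, List.range_add]
    simp only [List.map_append, List.map_map, Function.comp_def, List.append_assoc]
    congr 1
    · apply List.map_congr_left; intro i hi; rw [List.mem_range] at hi
      have hi' : (i : Int) < 2 * r := by omega
      simp only [List.cons.injEq, and_true]
      omega
    congr 1
    · apply List.map_congr_left; intro i hi; rw [List.mem_range] at hi
      have hi' : (i : Int) < 2 * r := by omega
      simp only [List.cons.injEq, and_true]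
      omega
    congr 1
    · apply List.map_congr_left; intro i hi; rw [List.mem_range] at hi
      have hi' : (i : Int) < 2 * r := by omega
      simp only [List.cons.injEq, and_true]
      omega
    · apply List.map_congr_left; intro i hi; rw [List.mem_range] at hi
      have hi' : (i : Int) < 2 * r := by omega
      simp only [List.cons.injEq, and_true]
      omega
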